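-- pv_equiv track=rewrite | github.com/BrettRey/erdos-problem-993 | verify_inductive_consistency_extended.py | parse_g6
-- ===== SOURCE A (Python) =====
-- def parse_g6(g6):
--     s = g6.strip()
--     n = ord(s[0]) - 63
--     adj = [[] for _ in range(n)]
--     bits = []
--     for ch in s[1:]:
--         val = ord(ch) - 63
--         for shift in range(5, -1, -1):
--             bits.append((val >> shift) & 1)
--     k = 0
--     for j in range(n):
--         for i in range(j):
--             if k < len(bits) and bits[k]:
--                 adj[i].append(j)
--                 adj[j].append(i)
--             k += 1
--     return n, adj
-- ===== SOURCE B (Python) =====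
-- def parse_g6(g6):
--     s = g6.strip()
--     n = ord(s[0]) - 63
--     adj = [[] for _ in range(n)]
--     avail = 6 * (len(s) - 1)
--     k, i, j = 0, 0, 1
--     while j < n and k < avail:
--         if (ord(s[1 + k // 6]) - 63 >> (5 - k % 6)) & 1:
--             adj[i].append(j)
--             adj[j].append(i)
--         k += 1
--         i += 1
--         if i == j:
--             i, j = 0, j + 1
--     return n, adj
-- ===== Notes on version B (the rewrite author's own statement) =====
-- stated objective: alternative
-- what changed: Replaces A's materialised bit list plus nested (j,i) loops with a single cursor loop that reads each payload bit directly from the string via ord(s[1+k//6]) and stops as soon as the pairs or the available bits run out.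
-- outside the precondition, e.g. on parse_g6('  '): A raises IndexError, B raises IndexError
import Mathlib
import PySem

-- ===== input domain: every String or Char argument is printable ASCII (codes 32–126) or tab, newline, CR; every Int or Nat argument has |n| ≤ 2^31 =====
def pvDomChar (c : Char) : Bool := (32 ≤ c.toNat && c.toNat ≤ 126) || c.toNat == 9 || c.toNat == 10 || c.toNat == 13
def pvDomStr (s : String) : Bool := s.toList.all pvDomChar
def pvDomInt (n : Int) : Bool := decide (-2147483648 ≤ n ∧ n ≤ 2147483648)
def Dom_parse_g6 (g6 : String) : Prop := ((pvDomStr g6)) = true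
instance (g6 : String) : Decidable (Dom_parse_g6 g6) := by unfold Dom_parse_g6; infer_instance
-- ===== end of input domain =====

-- B replaces A's materialised bit list and nested (j,i) loops by a single cursor loop
-- reading each payload bit straight from the string (objective: alternative decomposition).

-- `adj[idx].append(v)` on a list of lists (identity when idx is out of range; both
-- ports only call it in range).
def pvAppendAt : List (List Int) → Nat → Int → List (List Int)
  | [], _, _ => []
  | x :: xs, 0, v => (x ++ [v]) :: xs
  | x :: xs, m+1, v => x :: pvAppendAt xs m v

-- `(val >> t) & 1`: exact — Python's arithmetic right shift is floor division by 2^t,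
-- and `& 1` of an int is its nonnegative remainder mod 2.
def pvBit (val : Int) (t : Nat) : Int := PySem.Int.mod (PySem.Int.floordiv val ((2:Int)^t)) 2

-- ===== PORT A =====
-- bits = []; for ch in s[1:]: for shift in range(5,-1,-1): bits.append((val >> shift) & 1)
def pvBitsA (rest : List Char) : List Int :=
  rest.foldl (fun bits ch =>
    (PySem.List.pyRange 5 (-1) (-1)).foldl (fun bits shift =>
      bits ++ [pvBit ((ch.toNat : Int) - 63) shift.toNat]) bits) []

-- k = 0; for j in range(n): for i in range(j): if k < len(bits) and bits[k]: …; k += 1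
def pvFoldA (bits : List Int) (n : Nat) (adj : List (List Int)) : List (List Int) × Nat :=
  (List.range n).foldl (fun st j =>
    (List.range j).foldl (fun (st : List (List Int) × Nat) i =>
      (if st.2 < bits.length ∧ bits.getD st.2 0 ≠ 0 then
         pvAppendAt (pvAppendAt st.1 i (j : Int)) j (i : Int)
       else st.1, st.2 + 1)) st) (adj, 0)

def parse_g6 (g6 : String) : Int × List (List Int) :=
  match (PySem.Str.strip g6).toList with
  | [] => (0, [])   -- s[0] raises IndexError in Python; excluded by Pre_
  | c0 :: rest =>
    let n : Int := (c0.toNat : Int) - 63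
    (n, (pvFoldA (pvBitsA rest) n.toNat ((List.range n.toNat).map (fun _ => []))).1)

-- ===== PORT B =====
-- while j < n and k < avail: bit = (ord(s[1 + k//6]) - 63 >> (5 - k%6)) & 1; …; advance cursor.
-- k, i, j only ever increase from 0, so they are Nat; rest.getD is always in range
-- since k < avail = 6 * len(rest).
def pvLoopB (rest : List Char) (n : Int) (avail : Nat) (k i j : Nat)
    (adj : List (List Int)) : List (List Int) :=
  if h : (j : Int) < n ∧ k < avail then
    let adj' := if pvBit (((rest.getD (k / 6) ' ').toNat : Int) - 63) (5 - k % 6) ≠ 0 then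
        pvAppendAt (pvAppendAt adj i (j : Int)) j (i : Int)
      else adj
    if i + 1 = j then pvLoopB rest n avail (k+1) 0 (j+1) adj'
    else pvLoopB rest n avail (k+1) (i+1) j adj'
  else adj
  termination_by avail - k
  decreasing_by all_goals omega

def parse_g6_alt (g6 : String) : Int × List (List Int) :=
  match (PySem.Str.strip g6).toList with
  | [] => (0, [])   -- s[0] raises IndexError in Python; excluded by Pre_
  | c0 :: rest =>
    let n : Int := (c0.toNat : Int) - 63
    (n, pvLoopB rest n (6 * rest.length) 0 0 1 ((List.range n.toNat).map (fun _ => [])))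

-- ===== PRECONDITION & SPEC =====
-- Pre_ excludes exactly the inputs whose stripped form is empty: there `s[0]` raises
-- IndexError in A (and in B).
def Pre_parse_g6 (g6 : String) : Prop := (PySem.Str.strip g6).toList ≠ []
instance (g6 : String) : Decidable (Pre_parse_g6 g6) := by unfold Pre_parse_g6; infer_instance

def pvWitness_parse_g6 : String := "D"

def Spec_parse_g6 (g6 : String) (out : Int × List (List Int)) : Prop := out = parse_g6_alt g6
instance (g6 : String) (out : Int × List (List Int)) : Decidable (Spec_parse_g6 g6 out) := by unfold Spec_parse_g6; infer_instance

-- ===== CLAIM (what is proved, stated in full; the proofs are below) =====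
def Claim_equal_parse_g6 : Prop := ∀ (g6 : String), Dom_parse_g6 g6 → Pre_parse_g6 g6 → Spec_parse_g6 g6 (parse_g6 g6)

-- ===== LEMMAS AND PROOFS =====

-- the six bits of one payload character, high to low
def pvChunk (ch : Char) : List Int :=
  [pvBit ((ch.toNat : Int) - 63) 5, pvBit ((ch.toNat : Int) - 63) 4,
   pvBit ((ch.toNat : Int) - 63) 3, pvBit ((ch.toNat : Int) - 63) 2,
   pvBit ((ch.toNat : Int) - 63) 1, pvBit ((ch.toNat : Int) - 63) 0]

lemma pvBitsA_foldl_eq (rest : List Char) : ∀ (acc : List Int),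
    rest.foldl (fun bits ch =>
      (PySem.List.pyRange 5 (-1) (-1)).foldl (fun bits shift =>
        bits ++ [pvBit ((ch.toNat : Int) - 63) shift.toNat]) bits) acc
      = acc ++ rest.flatMap pvChunk := by
  have hr : PySem.List.pyRange 5 (-1) (-1) = [5, 4, 3, 2, 1, 0] := by decide
  induction rest with
  | nil => intro acc; simp
  | cons ch t ih =>
    intro acc
    rw [List.foldl_cons, ih]
    simp [hr, pvChunk]

lemma pvBitsA_eq (rest : List Char) : pvBitsA rest = rest.flatMap pvChunk := by
  have h := pvBitsA_foldl_eq rest []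
  simpa [pvBitsA] using h

lemma pvBitsA_length (rest : List Char) : (pvBitsA rest).length = 6 * rest.length := by
  rw [pvBitsA_eq]
  induction rest with
  | nil => simp
  | cons ch t ih => simp only [List.flatMap_cons, List.length_append, ih, pvChunk]; simp; omega

-- the bit B reads at position k equals A's bits[k]
lemma pvBits_getD (rest : List Char) (k : Nat) (hk : k < 6 * rest.length) :
    (pvBitsA rest).getD k 0 = pvBit (((rest.getD (k / 6) ' ').toNat : Int) - 63) (5 - k % 6) := by
  rw [pvBitsA_eq]
  induction rest generalizing k with
  | nil => simp at hk
  | cons ch t ih =>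
    rw [List.flatMap_cons]
    by_cases h6 : k < 6
    · interval_cases k <;> rfl
    · have hlen : (pvChunk ch).length = 6 := by simp [pvChunk]
      rw [List.getD_eq_getElem?_getD,
        List.getElem?_append_right (by omega : (pvChunk ch).length ≤ k), hlen,
        ← List.getD_eq_getElem?_getD]
      have hk' : k - 6 < 6 * t.length := by simp at hk; omega
      rw [ih (k - 6) hk']
      have h1 : k / 6 = (k - 6) / 6 + 1 := by omega
      have h2 : k % 6 = (k - 6) % 6 := by omega
      rw [h1, h2, List.getD_cons_succ]

-- A's fold as a fold over the explicit pair list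
def pvStepA (bits : List Int) (st : List (List Int) × Nat) (p : Nat × Nat) :
    List (List Int) × Nat :=
  (if st.2 < bits.length ∧ bits.getD st.2 0 ≠ 0 then
     pvAppendAt (pvAppendAt st.1 p.1 (p.2 : Int)) p.2 (p.1 : Int)
   else st.1, st.2 + 1)

def pvPairs (n : Nat) : List (Nat × Nat) :=
  (List.range n).flatMap (fun j => (List.range j).map (fun i => (i, j)))

lemma pvFoldl_flatMap {α β γ : Type} (l : List α) (g : α → List β)
    (f : γ → β → γ) (b : γ) :
    (l.flatMap g).foldl f b = l.foldl (fun acc x => (g x).foldl f acc) b := by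
  induction l generalizing b with
  | nil => rfl
  | cons x t ih => simp [List.flatMap_cons, List.foldl_append, ih]

lemma pvFoldA_eq (bits : List Int) (n : Nat) (adj : List (List Int)) :
    pvFoldA bits n adj = (pvPairs n).foldl (pvStepA bits) (adj, 0) := by
  simp only [pvFoldA, pvPairs, pvFoldl_flatMap, List.foldl_map, pvStepA]

-- pairs still to be visited from cursor position (i, j)
def pvTail (n i j : Nat) : List (Nat × Nat) :=
  if j < n then
    (List.range' i (j - i)).map (fun i' => (i', j)) ++
      (List.range' (j+1) (n - (j+1))).flatMap (fun j' => (List.range j').map (fun i' => (i', j')))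
  else []

lemma pvTail_step (n i j : Nat) (hij : i < j) (hjn : j < n) :
    pvTail n i j = (i, j) :: (if i + 1 = j then pvTail n 0 (j+1) else pvTail n (i+1) j) := by
  by_cases hlast : i + 1 = j
  · have hji : j - i = 1 := by omega
    by_cases hjn' : j + 1 < n
    · have hm : n - (j + 1) = (n - (j + 2)) + 1 := by omega
      simp only [pvTail, if_pos hjn, if_pos hjn', hji, hm, List.range'_succ, hlast, if_pos]
      simp [List.range_eq_range']
    · have hm : n - (j + 1) = 0 := by omega
      simp only [pvTail, if_pos hjn, if_neg hjn', hji, hm, List.range'_succ, hlast, if_pos]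
      simp
  · have hji : j - i = (j - (i + 1)) + 1 := by omega
    simp only [pvTail, if_pos hjn, hji, List.range'_succ, if_neg hlast]
    simp

lemma pvTail_start (n : Nat) (hn : 2 ≤ n) : pvTail n 0 1 = pvPairs n := by
  obtain ⟨m, rfl⟩ : ∃ m, n = m + 2 := ⟨n - 2, by omega⟩
  simp only [pvTail, pvPairs, if_pos (by omega : 1 < m + 2)]
  have h1 : List.range (m + 2) = List.range' 0 (m + 2) := by rw [List.range_eq_range']
  have h2 : List.range' 0 (m + 2) = 0 :: List.range' 1 (m + 1) := by rw [List.range'_succ]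
  have h3 : List.range' 1 (m + 1) = 1 :: List.range' 2 m := by rw [List.range'_succ]
  rw [h1, h2, h3]
  simp [List.range'_succ]

lemma pvStepA_frozen (bits : List Int) (ps : List (Nat × Nat)) :
    ∀ (adj : List (List Int)) (k : Nat), bits.length ≤ k →
    (ps.foldl (pvStepA bits) (adj, k)).1 = adj := by
  induction ps with
  | nil => intro adj k h; rfl
  | cons p t ih =>
    intro adj k h
    have hc : ¬ (k < bits.length ∧ bits.getD k 0 ≠ 0) := by
      rintro ⟨h1, -⟩; omega
    rw [List.foldl_cons]
    show (t.foldl (pvStepA bits) (pvStepA bits (adj, k) p)).1 = adj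
    rw [pvStepA, if_neg hc]
    exact ih adj (k + 1) (by omega)

lemma pvLoop_eq (rest : List Char) (n : Int) (hn : 2 ≤ n) (ps : List (Nat × Nat)) :
    ∀ (k i j : Nat) (adj : List (List Int)), i < j → ps = pvTail n.toNat i j →
    (ps.foldl (pvStepA (pvBitsA rest)) (adj, k)).1 =
      pvLoopB rest n (6 * rest.length) k i j adj := by
  induction ps with
  | nil =>
    intro k i j adj hij hps
    have hjn : ¬ j < n.toNat := by
      intro hj
      rw [pvTail, if_pos hj] at hps
      have : j - i ≠ 0 := by omega
      cases hr : List.range' i (j - i) with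
      | nil => exact this (by simpa using congrArg List.length hr)
      | cons a l => rw [hr] at hps; simp at hps
    rw [pvLoopB]
    rw [dif_neg (by omega)]
    rfl
  | cons p t ih =>
    intro k i j adj hij hps
    have hjn : j < n.toNat := by
      by_contra hj
      rw [pvTail, if_neg hj] at hps
      simp at hps
    rw [pvTail_step n.toNat i j hij hjn] at hps
    injection hps with hp ht
    subst hp
    rw [pvLoopB]
    by_cases hk : k < 6 * rest.length
    · rw [dif_pos ⟨by omega, hk⟩]
      rw [List.foldl_cons]
      have hblen : (pvBitsA rest).length = 6 * rest.length := pvBitsA_length rest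
      have hbit := pvBits_getD rest k hk
      have hstep : pvStepA (pvBitsA rest) (adj, k) (i, j) =
          (if pvBit (((rest.getD (k / 6) ' ').toNat : Int) - 63) (5 - k % 6) ≠ 0 then
             pvAppendAt (pvAppendAt adj i (j : Int)) j (i : Int)
           else adj, k + 1) := by
        rw [pvStepA]
        by_cases hb : pvBit (((rest.getD (k / 6) ' ').toNat : Int) - 63) (5 - k % 6) ≠ 0
        · rw [if_pos ⟨by omega, by rw [hbit]; exact hb⟩, if_pos hb]
        · rw [if_neg (by rw [hbit]; tauto), if_neg hb]
      rw [hstep]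
      by_cases hlast : i + 1 = j
      · rw [if_pos hlast] at ht ⊢
        exact ih (k + 1) 0 (j + 1) _ (by omega) ht
      · rw [if_neg hlast] at ht ⊢
        exact ih (k + 1) (i + 1) j _ (by omega) ht
    · rw [dif_neg (by tauto)]
      have : (pvBitsA rest).length ≤ k := by rw [pvBitsA_length]; omega
      exact pvStepA_frozen (pvBitsA rest) ((i, j) :: t) adj k this

-- ===== VERDICT (by name: the statement is the Claim_ definition above) =====
lemma pvPairs_small (n : Nat) (hn : n ≤ 1) : pvPairs n = [] := by
  interval_cases n <;> simp [pvPairs]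

theorem parse_g6_spec : Claim_equal_parse_g6 := by
  intro g6 _hdom hpre
  unfold Spec_parse_g6 parse_g6 parse_g6_alt
  cases hs : (PySem.Str.strip g6).toList with
  | nil => exact absurd hs hpre
  | cons c0 rest =>
    simp only
    refine congrArg _ ?_
    rw [pvFoldA_eq]
    set n : Int := (c0.toNat : Int) - 63 with hn
    by_cases h2 : 2 ≤ n
    · rw [← pvTail_start n.toNat (by omega)]
      exact pvLoop_eq rest n h2 _ 0 0 1 _ (by omega) rfl
    · rw [pvPairs_small n.toNat (by omega), List.foldl_nil]
      rw [pvLoopB, dif_neg (by omega)]
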